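-- pv_equiv track=rewrite | github.com/roshan2M/edX--mitX--introduction-to-computer-science-and-programming-with-python | Week 5/Lecture 9 - Efficiency and Orders of Growth/In-Video Problems/Lec9.2Slide2.py | f
-- ===== SOURCE A (Python) =====
-- def f(x):
--     for i in range(1000):
--         ans = i
--     for i in range(x):
--         ans += 1
--     for i in range(x):
--         for j in range(x):
--             ans += 1
--     return ans
-- ===== SOURCE B (Python) =====
-- def f(x):
--     n = x if x > 0 else 0
--     return 999 + n + n * n
-- ===== Notes on version B (the rewrite author's own statement) =====
-- stated objective: faster
-- what changed: Replaced the three loops (constant 1000-step loop, linear loop, nested quadratic loop) by the arithmetic closed form 999 + n + n*n with n = max(0, x).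
import Mathlib
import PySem

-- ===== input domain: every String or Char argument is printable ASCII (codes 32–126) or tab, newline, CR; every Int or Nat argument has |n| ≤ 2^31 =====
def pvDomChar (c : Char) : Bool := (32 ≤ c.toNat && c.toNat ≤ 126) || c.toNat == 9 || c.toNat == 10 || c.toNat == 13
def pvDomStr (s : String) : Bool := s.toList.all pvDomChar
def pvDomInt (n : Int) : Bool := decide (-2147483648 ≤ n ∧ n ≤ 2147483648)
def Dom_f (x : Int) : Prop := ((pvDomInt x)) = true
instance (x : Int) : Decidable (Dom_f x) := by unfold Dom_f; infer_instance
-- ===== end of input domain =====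

-- B replaces A's constant, linear and quadratic loops by the closed form 999 + n + n*n, n = max(0,x) (asymptotically faster).


-- ===== PORT A =====
-- literal port: first loop overwrites ans with i each step (initial 0 unused, the
-- loop always runs 1000 times); then a linear loop and a nested quadratic loop add 1.
def f (x : Int) : Int :=
  let ans := (PySem.List.pyRange 0 1000 1).foldl (fun _ i => i) 0
  let ans := (PySem.List.pyRange 0 x 1).foldl (fun a _ => a + 1) ans
  let ans := (PySem.List.pyRange 0 x 1).foldl
      (fun a _ => (PySem.List.pyRange 0 x 1).foldl (fun b _ => b + 1) a) ans
  ans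

-- ===== PORT B =====
def f_alt (x : Int) : Int :=
  let n := if x > 0 then x else 0
  999 + n + n * n

-- ===== PRECONDITION & SPEC =====
def Spec_f (x : Int) (out : Int) : Prop := out = f_alt x
instance (x : Int) (out : Int) : Decidable (Spec_f x out) := by unfold Spec_f; infer_instance

-- ===== CLAIM (what is proved, stated in full; the proofs are below) =====
def Claim_equal_f : Prop := ∀ (x : Int), Dom_f x → Spec_f x (f x)

-- ===== LEMMAS AND PROOFS =====

-- an "ans += c" loop over any list adds c per element
theorem foldl_add_const (l : List Int) (c init : Int) :
    l.foldl (fun a _ => a + c) init = init + l.length * c := by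
  induction l generalizing init with
  | nil => simp
  | cons h t ih => simp [List.foldl, ih, Int.add_mul]; ring

-- the first loop leaves ans = 999
theorem first_loop : (PySem.List.pyRange 0 1000 1).foldl (fun _ i => i) 0 = 999 := by
  have h : (1000 : Int) = 999 + 1 := by norm_num
  rw [h, PySem.List.pyRange_one_succ_right (a := 0) (b := 999) (by norm_num)]
  rw [List.foldl_append]
  simp

theorem f_closed (x : Int) : f x = 999 + (x.toNat : Int) + (x.toNat : Int) * (x.toNat : Int) := by
  unfold f
  rw [first_loop]
  have hlen : ((PySem.List.pyRange 0 x 1).length : Int) = (x.toNat : Int) := by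
    rw [PySem.List.length_pyRange_one]; simp
  have hinner : ∀ a : Int,
      (PySem.List.pyRange 0 x 1).foldl (fun b _ => b + 1) a = a + (x.toNat : Int) := by
    intro a; rw [foldl_add_const]; rw [hlen]; ring
  have houter :
      (PySem.List.pyRange 0 x 1).foldl
        (fun a _ => (PySem.List.pyRange 0 x 1).foldl (fun b _ => b + 1) a)
        ((PySem.List.pyRange 0 x 1).foldl (fun a _ => a + 1) 999)
      = 999 + (x.toNat : Int) + (x.toNat : Int) * (x.toNat : Int) := by
    have : (fun a (_ : Int) => (PySem.List.pyRange 0 x 1).foldl (fun b _ => b + 1) a)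
        = fun a _ => a + (x.toNat : Int) := by
      funext a _; exact hinner a
    rw [this, foldl_add_const, foldl_add_const, hlen]
    ring
  simpa using houter

-- ===== VERDICT (by name: the statement is the Claim_ definition above) =====
theorem f_spec : Claim_equal_f := by
  intro x _
  unfold Spec_f f_alt
  rw [f_closed]
  by_cases h : 0 < x
  · have : ((x.toNat : Int)) = x := Int.toNat_of_nonneg h.le
    rw [this, if_pos h]
  · have h0 : x ≤ 0 := not_lt.mp h
    simp [if_neg h, Int.toNat_of_nonpos h0]
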